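-- pv_equiv track=rewrite | github.com/Huxhh/LeetCodePy | WeeklyMatch/189.py | arrangeWords
-- ===== SOURCE A (Python) =====
-- def arrangeWords(text):
--     words = text.split()
--     words = [w.lower() for w in words]
--     d = {}
--
--     for w in words:
--         if len(w) not in d:
--             d[len(w)] = []
--         d[len(w)].append(w)
--
--     k = d.keys()
--     k = sorted(k)
--     res = []
--     for s in k:
--         res.extend(d[s])
--     res[0] = res[0][0].upper() + res[0][1:]
--     res = ' '.join(res)
--     return res
-- ===== SOURCE B (Python) =====
-- def arrangeWords(text):
--     words = sorted((w.lower() for w in text.split()), key=len)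
--     words[0] = words[0][0].upper() + words[0][1:]
--     return ' '.join(words)
-- ===== Notes on version B (the rewrite author's own statement) =====
-- stated objective: simpler
-- what changed: Replaced the length-keyed bucket dict plus sorted-keys concatenation with a single stable sort of the lowercased words by length (Python's sort stability reproduces the bucket append order).
import Mathlib
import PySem

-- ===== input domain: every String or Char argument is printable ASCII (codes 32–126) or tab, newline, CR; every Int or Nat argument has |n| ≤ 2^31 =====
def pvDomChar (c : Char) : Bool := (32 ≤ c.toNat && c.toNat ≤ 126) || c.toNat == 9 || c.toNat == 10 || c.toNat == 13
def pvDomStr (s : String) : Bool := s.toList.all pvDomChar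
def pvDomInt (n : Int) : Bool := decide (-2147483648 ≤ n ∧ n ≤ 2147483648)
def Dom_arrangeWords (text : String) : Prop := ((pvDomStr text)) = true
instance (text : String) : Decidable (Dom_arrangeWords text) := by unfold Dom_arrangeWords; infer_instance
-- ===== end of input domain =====

-- B replaces A's length-keyed bucket dict + sorted-keys concatenation with one stable sort of the
-- lowercased words by length (objective: simpler).

-- ===== PORT A =====
def arrangeWords (text : String) : String :=
  let words := PySem.Chars.split₀ text.toList
  let words := words.map PySem.Chars.lower
  let d : PySem.Dict Int (List (List Char)) :=
    words.foldl (fun d w =>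
      let d := if d.contains ((w.length : Int)) then d else d.insert ((w.length : Int)) []
      d.modify ((w.length : Int)) [] (fun l => l ++ [w])) PySem.Dict.empty
  let k := d.keys
  let k := PySem.List.sorted k (fun x => x)
  let res := k.foldl (fun res s => res ++ d.getD s []) []
  match res with
  | [] => ""            -- Python: res[0] raises IndexError here; excluded by Pre_
  | r0 :: rest =>
    match r0 with
    | [] => ""          -- Python: res[0][0] would raise; unreachable (split words are nonempty)
    | c :: cs => String.ofList (PySem.Chars.join [' '] ((PySem.Chars.upperChar c :: cs) :: rest))

-- ===== PORT B =====
def arrangeWords_alt (text : String) : String :=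
  let words := PySem.List.sorted ((PySem.Chars.split₀ text.toList).map PySem.Chars.lower)
      (fun w => (w.length : Int))
  match words with
  | [] => ""            -- Python: words[0] raises IndexError here; excluded by Pre_
  | [] :: _ => ""       -- unreachable (split words are nonempty)
  | (c :: cs) :: rest => String.ofList (PySem.Chars.join [' '] ((PySem.Chars.upperChar c :: cs) :: rest))

-- ===== PRECONDITION & SPEC =====
-- Pre_ excludes whitespace-only (incl. empty) text, on which both A and B raise IndexError indexing word 0.
def Pre_arrangeWords (text : String) : Prop := PySem.Chars.split₀ text.toList ≠ []
instance (text : String) : Decidable (Pre_arrangeWords text) := by unfold Pre_arrangeWords; infer_instance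
def pvWitness_arrangeWords : String := "Leetcode is COOL"
def Spec_arrangeWords (text : String) (out : String) : Prop := out = arrangeWords_alt text
instance (text : String) (out : String) : Decidable (Spec_arrangeWords text out) := by unfold Spec_arrangeWords; infer_instance

-- ===== CLAIM (what is proved, stated in full; the proofs are below) =====
def Claim_equal_arrangeWords : Prop := ∀ (text : String), Dom_arrangeWords text → Pre_arrangeWords text → Spec_arrangeWords text (arrangeWords text)

-- ===== LEMMAS AND PROOFS =====

-- A's two-statement bucket update ("if missing insert []; then append") is one Dict.modify.
theorem stepA_eq_modify (d : PySem.Dict Int (List (List Char))) (n : Int) (w : List Char) :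
    ((if d.contains n then d else d.insert n []).modify n [] (fun l => l ++ [w]))
      = d.modify n [] (fun l => l ++ [w]) := by
  by_cases h : d.contains n
  · simp [h]
  · have hf : d.contains n = false := by simpa using h
    simp only [hf, Bool.false_eq_true, if_false]
    simp only [PySem.Dict.modify, PySem.Dict.getD_insert,
      PySem.Dict.getD_of_not_contains d [] hf]
    apply PySem.Dict.ext
    rw [PySem.Dict.items_insert_of_contains _ _ (PySem.Dict.contains_insert_self d n []),
      PySem.Dict.items_insert_of_not_contains _ _ hf,
      PySem.Dict.items_insert_of_not_contains _ _ hf, List.map_append]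
    have hkeys : ∀ p ∈ d.items, (p.1 == n) = false := by
      have h2 := hf
      simp only [PySem.Dict.contains, List.any_eq_false] at h2
      exact fun p hp => by simpa using h2 p hp
    congr 1
    · conv_rhs => rw [← List.map_id d.items]
      exact List.map_congr_left (fun p hp => by simp [hkeys p hp])
    · simp

-- the bucket dict's value at c is the subsequence of words of length c
theorem bucket_getD (ws : List (List Char)) (c : Int) :
    (ws.foldl (fun d w => d.modify ((w.length : Int)) [] (fun l => l ++ [w]))
        (PySem.Dict.empty : PySem.Dict Int (List (List Char)))).getD c []
      = ws.filter (fun w => ((w.length : Int) == c)) := by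
  have hmap : ws.foldl (fun d w => d.modify ((w.length : Int)) [] (fun l => l ++ [w]))
        (PySem.Dict.empty : PySem.Dict Int (List (List Char)))
      = (ws.map (fun w => ((w.length : Int), w))).foldl
          (fun d p => d.modify p.1 [] (fun l => l ++ [p.2])) PySem.Dict.empty := by
    rw [List.foldl_map]
  rw [hmap, PySem.Dict.getD_foldl_modify_append]
  simp [PySem.Dict.getD, PySem.Dict.get?, PySem.Dict.empty, List.filter_map, Function.comp_def]

theorem bucket_keys (ws : List (List Char)) :
    (ws.foldl (fun d w => d.modify ((w.length : Int)) [] (fun l => l ++ [w]))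
        (PySem.Dict.empty : PySem.Dict Int (List (List Char)))).keys
      = PySem.Set.ofList (ws.map (fun w => (w.length : Int))) := by
  rw [PySem.Dict.keys_foldl_modify_key ws (fun w => ((w.length : Int))) [] (fun _ w l => l ++ [w])]
  simp [PySem.Set.update, PySem.Set.ofList_eq_foldl, PySem.Dict.keys, PySem.Dict.empty]

theorem insertBy_all_before {α : Type} (before : α → α → Bool) (x : α) (l : List α)
    (h : ∀ y ∈ l, before x y = true) :
    PySem.List.insertBy before x l = x :: l := by
  cases l with
  | nil => rfl
  | cons a t => simp [PySem.List.insertBy, h a (List.mem_cons_self)]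

theorem insertBy_append_skip {α : Type} (before : α → α → Bool) (x : α) (l1 l2 : List α)
    (h : ∀ y ∈ l1, before x y = false) :
    PySem.List.insertBy before x (l1 ++ l2) = l1 ++ PySem.List.insertBy before x l2 := by
  induction l1 with
  | nil => rfl
  | cons a t ih =>
    have ha : before x a = false := h a (List.mem_cons_self)
    have ht := ih (fun y hy => h y (List.mem_cons_of_mem a hy))
    simp [PySem.List.insertBy, ha, ht]

theorem flatMap_congr_mem {α β : Type} (l : List α) (f g : α → List β)
    (h : ∀ x ∈ l, f x = g x) : l.flatMap f = l.flatMap g := by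
  induction l with
  | nil => rfl
  | cons a t ih =>
    simp only [List.flatMap_cons, h a (List.mem_cons_self)]
    rw [ih (fun x hx => h x (List.mem_cons_of_mem a hx))]

-- stable insertion into a key-grouped concatenation, key already present
theorem insertBy_flatMap_mem {W : Type} (key : W → Int) (w : W) (ks : List Int) (g : Int → List W)
    (hk : ks.Pairwise (· < ·)) (hg : ∀ c ∈ ks, ∀ x ∈ g c, key x = c) (hn : key w ∈ ks) :
    PySem.List.insertBy (fun a b => decide (key a < key b)) w (ks.flatMap g)
      = ks.flatMap (fun c => if c = key w then g c ++ [w] else g c) := by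
  induction ks with
  | nil => simp at hn
  | cons c t ih =>
    rcases List.pairwise_cons.mp hk with ⟨hct, ht⟩
    by_cases hc : c = key w
    · have hskip : ∀ y ∈ g c, (fun a b => decide (key a < key b)) w y = false := by
        intro y hy
        have hyk : key y = c := hg c (List.mem_cons_self) y hy
        simp [hyk, hc]
      have hall : ∀ y ∈ t.flatMap g, (fun a b => decide (key a < key b)) w y = true := by
        intro y hy
        rcases List.mem_flatMap.mp hy with ⟨c', hc', hyc'⟩
        have hyk : key y = c' := hg c' (List.mem_cons_of_mem c hc') y hyc'
        have hcc : c < c' := hct c' hc'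
        simp [hyk]
        omega
      have hrest : t.flatMap (fun c' => if c' = key w then g c' ++ [w] else g c')
          = t.flatMap g := by
        apply flatMap_congr_mem
        intro x hx
        have hcx : c < x := hct x hx
        have hxne : x ≠ key w := by
          intro he
          rw [he, ← hc] at hcx
          exact lt_irrefl _ hcx
        rw [if_neg hxne]
      simp only [List.flatMap_cons]
      rw [insertBy_append_skip _ _ _ _ hskip, insertBy_all_before _ _ _ hall, if_pos hc, hrest]
      simp
    · have hnt : key w ∈ t := by
        rcases List.mem_cons.mp hn with h1 | h1
        · exact absurd h1.symm hc
        · exact h1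
      have hskip : ∀ y ∈ g c, (fun a b => decide (key a < key b)) w y = false := by
        intro y hy
        have hyk : key y = c := hg c (List.mem_cons_self) y hy
        have hcw : c < key w := hct _ hnt
        simp [hyk]
        omega
      rw [List.flatMap_cons, insertBy_append_skip _ _ _ _ hskip,
        ih ht (fun c' hc' x hx => hg c' (List.mem_cons_of_mem c hc') x hx) hnt,
        List.flatMap_cons, if_neg hc]

-- stable insertion into a key-grouped concatenation, new key
theorem insertBy_flatMap_not_mem {W : Type} (key : W → Int) (w : W) (ks : List Int) (g : Int → List W)
    (hk : ks.Pairwise (· < ·)) (hg : ∀ c ∈ ks, ∀ x ∈ g c, key x = c) (hn : key w ∉ ks) :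
    PySem.List.insertBy (fun a b => decide (key a < key b)) w (ks.flatMap g)
      = (PySem.List.insertBy (fun a b => decide (a < b)) (key w) ks).flatMap
          (fun c => if c = key w then [w] else g c) := by
  induction ks with
  | nil => simp [PySem.List.insertBy]
  | cons c t ih =>
    rcases List.pairwise_cons.mp hk with ⟨hct, ht⟩
    have hcw : c ≠ key w := fun he => hn (by rw [← he]; exact List.mem_cons_self)
    by_cases hlt : key w < c
    · have hall : ∀ y ∈ (c :: t).flatMap g, (fun a b => decide (key a < key b)) w y = true := by
        intro y hy
        rcases List.mem_flatMap.mp hy with ⟨c', hc', hyc'⟩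
        have hyk : key y = c' := hg c' hc' y hyc'
        have hcc : c ≤ c' := by
          rcases List.mem_cons.mp hc' with h1 | h1
          · exact le_of_eq h1.symm
          · exact le_of_lt (hct _ h1)
        simp [hyk]
        omega
      have hrest : t.flatMap (fun c' => if c' = key w then [w] else g c') = t.flatMap g :=
        flatMap_congr_mem _ _ _ (fun x hx => by
          rw [if_neg (show x ≠ key w from
            fun he => hn (List.mem_cons_of_mem c (he ▸ hx)))])
      have hins : PySem.List.insertBy (fun a b => decide (a < b)) (key w) (c :: t)
          = key w :: c :: t := by
        simp [PySem.List.insertBy, hlt]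
      rw [insertBy_all_before _ _ _ hall, hins]
      simp only [List.flatMap_cons, hrest]
      simp [hcw]
    · have hskip : ∀ y ∈ g c, (fun a b => decide (key a < key b)) w y = false := by
        intro y hy
        have hyk : key y = c := hg c (List.mem_cons_self) y hy
        simp [hyk]
        omega
      have hins : PySem.List.insertBy (fun a b => decide (a < b)) (key w) (c :: t)
          = c :: PySem.List.insertBy (fun a b => decide (a < b)) (key w) t := by
        simp [PySem.List.insertBy, hlt]
      rw [List.flatMap_cons, insertBy_append_skip _ _ _ _ hskip,
        ih ht (fun c' hc' x hx => hg c' (List.mem_cons_of_mem c hc') x hx)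
          (fun h1 => hn (List.mem_cons_of_mem c h1)),
        hins, List.flatMap_cons, if_neg hcw]

-- a stable sort by key is the concatenation, over the sorted distinct keys, of the per-key subsequences
theorem sorted_eq_group {W : Type} (key : W → Int) (ws : List W) :
    PySem.List.sorted ws key
      = (PySem.List.sorted (PySem.Set.ofList (ws.map key)) (fun x => x)).flatMap
          (fun c => ws.filter (fun w => key w == c)) := by
  induction ws using List.reverseRecOn with
  | nil =>
    rw [PySem.List.sorted_eq_foldl_insertBy, PySem.List.sorted_eq_foldl_insertBy]
    simp [PySem.Set.ofList_eq_foldl]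
  | append_singleton ws w ih =>
    have hL : PySem.List.sorted (ws ++ [w]) key
        = PySem.List.insertBy (fun a b => decide (key a < key b)) w (PySem.List.sorted ws key) := by
      rw [PySem.List.sorted_eq_foldl_insertBy, PySem.List.sorted_eq_foldl_insertBy,
        List.foldl_append, List.foldl_cons, List.foldl_nil]
    have hk := PySem.List.sorted_ofList_pairwise_lt (ws.map key)
    have hg : ∀ c ∈ PySem.List.sorted (PySem.Set.ofList (ws.map key)) (fun x => x),
        ∀ x ∈ ws.filter (fun w' => key w' == c), key x = c := by
      intro c _ x hx
      exact beq_iff_eq.mp (List.mem_filter.mp hx).2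
    have hmapapp : (ws ++ [w]).map key = ws.map key ++ [key w] := by simp
    have hofl : PySem.Set.ofList (ws.map key ++ [key w])
        = PySem.Set.add (PySem.Set.ofList (ws.map key)) (key w) := by
      rw [PySem.Set.ofList_eq_foldl, List.foldl_append, List.foldl_cons, List.foldl_nil,
        ← PySem.Set.ofList_eq_foldl]
    have hbucket : ∀ c, (ws ++ [w]).filter (fun w' => key w' == c)
        = ws.filter (fun w' => key w' == c) ++ (if key w == c then [w] else []) := by
      intro c
      rw [List.filter_append]
      congr 1
      by_cases h : key w = c
      · simp [List.filter, h]
      · simp [List.filter, beq_eq_false_iff_ne.mpr h]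
    by_cases hmem : key w ∈ PySem.Set.ofList (ws.map key)
    · have hadd : PySem.Set.add (PySem.Set.ofList (ws.map key)) (key w)
          = PySem.Set.ofList (ws.map key) := by
        simp [PySem.Set.add, hmem]
      rw [hL, ih,
        insertBy_flatMap_mem key w _ _ hk hg ((PySem.List.mem_sorted _ _ _ _).mpr hmem),
        hmapapp, hofl, hadd]
      apply flatMap_congr_mem
      intro c hc
      rw [hbucket c]
      by_cases hcw : c = key w
      · subst hcw
        simp
      · have hbe : (key w == c) = false := beq_eq_false_iff_ne.mpr (Ne.symm hcw)
        rw [if_neg hcw, hbe]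
        simp
    · have hadd : PySem.Set.add (PySem.Set.ofList (ws.map key)) (key w)
          = PySem.Set.ofList (ws.map key) ++ [key w] := by
        simp [PySem.Set.add, hmem]
      have hks' : PySem.List.sorted (PySem.Set.ofList (ws.map key) ++ [key w]) (fun x => x)
          = PySem.List.insertBy (fun a b => decide (a < b)) (key w)
              (PySem.List.sorted (PySem.Set.ofList (ws.map key)) (fun x => x)) := by
        apply PySem.List.sorted_id_eq_of_perm_of_pairwise
        · exact ((PySem.List.insertBy_perm _ _ _).trans
            ((PySem.List.sorted_perm _ _ _).cons (key w))).trans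
            (List.perm_append_singleton _ _).symm
        · exact PySem.List.insertBy_pairwise_le (fun x => x) (key w) _ (hk.imp le_of_lt)
      rw [hL, ih,
        insertBy_flatMap_not_mem key w _ _ hk hg
          (fun h1 => hmem ((PySem.List.mem_sorted _ _ _ _).mp h1)),
        hmapapp, hofl, hadd, hks']
      apply flatMap_congr_mem
      intro c hc
      rcases (PySem.List.insertBy_mem_iff _ _ _ _).mp hc with hcw | hcks
      · rw [if_pos hcw, hbucket c, hcw]
        have hnil : ws.filter (fun w' => key w' == key w) = [] :=
          List.filter_eq_nil_iff.mpr (fun x hx hbe =>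
            hmem ((PySem.Set.mem_ofList _ _).mpr (List.mem_map.mpr ⟨x, hx, beq_iff_eq.mp hbe⟩)))
        rw [hnil]
        simp
      · have hcw : c ≠ key w := fun he => hmem ((PySem.List.mem_sorted _ _ _ _).mp (he ▸ hcks))
        have hbe : (key w == c) = false := beq_eq_false_iff_ne.mpr (Ne.symm hcw)
        rw [if_neg hcw, hbucket c, hbe]
        simp

-- A's whole pipeline after lowercasing (bucket dict, sorted keys, concatenation) is B's stable sort
theorem resA_eq_sorted (ws : List (List Char)) :
    (PySem.List.sorted
        (ws.foldl (fun d w =>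
            (if d.contains ((w.length : Int)) then d else d.insert ((w.length : Int)) []).modify
              ((w.length : Int)) [] (fun l => l ++ [w]))
          (PySem.Dict.empty : PySem.Dict Int (List (List Char)))).keys (fun x => x)).foldl
        (fun res s => res ++
          (ws.foldl (fun d w =>
              (if d.contains ((w.length : Int)) then d else d.insert ((w.length : Int)) []).modify
                ((w.length : Int)) [] (fun l => l ++ [w]))
            (PySem.Dict.empty : PySem.Dict Int (List (List Char)))).getD s []) []
      = PySem.List.sorted ws (fun w => (w.length : Int)) := by
  have hfold : ws.foldl (fun d w =>
        (if d.contains ((w.length : Int)) then d else d.insert ((w.length : Int)) []).modify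
          ((w.length : Int)) [] (fun l => l ++ [w]))
        (PySem.Dict.empty : PySem.Dict Int (List (List Char)))
      = ws.foldl (fun d w => d.modify ((w.length : Int)) [] (fun l => l ++ [w]))
          PySem.Dict.empty :=
    PySem.List.foldl_congr_mem ws _ _ _ (fun acc x _ => stepA_eq_modify acc _ x)
  rw [hfold, PySem.List.foldl_append_eq_flatMap, List.nil_append, bucket_keys]
  have hget : (fun s => (ws.foldl (fun d w => d.modify ((w.length : Int)) [] (fun l => l ++ [w]))
      (PySem.Dict.empty : PySem.Dict Int (List (List Char)))).getD s [])
      = fun s => ws.filter (fun w => ((w.length : Int) == s)) := funext (bucket_getD ws)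
  rw [hget, ← sorted_eq_group]

-- ===== VERDICT (by name: the statement is the Claim_ definition above) =====
theorem arrangeWords_spec : Claim_equal_arrangeWords := by
  intro text _ _
  show arrangeWords text = arrangeWords_alt text
  simp only [arrangeWords, arrangeWords_alt]
  rw [resA_eq_sorted]
  set res := PySem.List.sorted (List.map PySem.Chars.lower (PySem.Chars.split₀ text.toList))
      (fun w => ((w.length : Int))) with hres
  clear_value res
  rcases res with _ | ⟨_ | ⟨c, cs⟩, rest⟩ <;> rfl
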